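-- pv_equiv track=rewrite | github.com/yeojeong735/coding_test | 프로그래머스/0/181874. A 강조하기/A 강조하기.py | solution
-- ===== SOURCE A (Python) =====
-- def solution(myString):
--     answer = ''
--
--     for ch in myString:
--         if ch == 'a':
--             answer += ('A')
--         elif ch != 'A' and ch.isupper():
--             answer += (ch.lower())
--         else :
--             answer += ch
--     return answer
-- ===== SOURCE B (Python) =====
-- def solution(myString):
--     # table-driven: precompute the branch logic into a translation table
--     table = str.maketrans("BCDEFGHIJKLMNOPQRSTUVWXYZa", "bcdefghijklmnopqrstuvwxyzA")
--     return myString.translate(table)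
-- ===== Notes on version B (the rewrite author's own statement) =====
-- stated objective: idiomatic
-- what changed: Replaces the per-character if/elif/else string-concatenation loop by a precomputed translation table (str.maketrans mapping B-Z to lowercase and 'a' to 'A') applied in one str.translate pass.
import Mathlib
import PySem

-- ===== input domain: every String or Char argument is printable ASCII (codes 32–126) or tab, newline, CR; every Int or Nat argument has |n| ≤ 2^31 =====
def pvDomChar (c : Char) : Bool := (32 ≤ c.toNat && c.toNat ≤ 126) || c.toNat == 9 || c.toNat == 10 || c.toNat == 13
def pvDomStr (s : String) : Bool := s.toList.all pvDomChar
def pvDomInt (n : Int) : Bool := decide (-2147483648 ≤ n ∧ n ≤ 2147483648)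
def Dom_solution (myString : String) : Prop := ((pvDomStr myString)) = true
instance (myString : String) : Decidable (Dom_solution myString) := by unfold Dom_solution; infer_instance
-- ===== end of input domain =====

-- B replaces A's per-character if/elif/else loop by a precomputed translation table
-- (uppercase-except-'A' → lowercase, 'a' → 'A') applied in one table-lookup pass (idiomatic).

-- ===== PORT A =====
def solution (myString : String) : String :=
  myString.toList.foldl (fun answer ch =>
    if ch = 'a' then answer.push 'A'
    else if ch ≠ 'A' ∧ PySem.Chars.isupper ch then answer.push (PySem.Chars.lowerChar ch)
    else answer.push ch) ""

-- ===== PORT B =====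
-- str.maketrans("BCDEFGHIJKLMNOPQRSTUVWXYZa", "bcdefghijklmnopqrstuvwxyzA")
def pvTable : PySem.Dict Char Char :=
  PySem.Dict.ofList (List.zip "BCDEFGHIJKLMNOPQRSTUVWXYZa".toList "bcdefghijklmnopqrstuvwxyzA".toList)

-- myString.translate(table): each char replaced by its table entry, kept if absent
def solution_alt (myString : String) : String :=
  String.ofList (myString.toList.map (fun ch => pvTable.getD ch ch))

-- ===== PRECONDITION & SPEC =====
def Spec_solution (myString : String) (out : String) : Prop := out = solution_alt myString
instance (myString : String) (out : String) : Decidable (Spec_solution myString out) := by unfold Spec_solution; infer_instance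

-- ===== CLAIM (what is proved, stated in full; the proofs are below) =====
def Claim_equal_solution : Prop := ∀ (myString : String), Dom_solution myString → Spec_solution myString (solution myString)

-- ===== LEMMAS AND PROOFS =====

-- A's per-character branch as a function
def pvStepA (ch : Char) : Char :=
  if ch = 'a' then 'A'
  else if ch ≠ 'A' ∧ PySem.Chars.isupper ch then PySem.Chars.lowerChar ch
  else ch

lemma foldA_eq (l : List Char) : ∀ (acc : String),
    (l.foldl (fun answer ch =>
      if ch = 'a' then answer.push 'A'
      else if ch ≠ 'A' ∧ PySem.Chars.isupper ch then answer.push (PySem.Chars.lowerChar ch)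
      else answer.push ch) acc).toList = acc.toList ++ l.map pvStepA := by
  induction l with
  | nil => intro acc; simp
  | cons c t ih =>
    intro acc
    simp only [List.foldl_cons, List.map_cons, ih, pvStepA]
    split_ifs <;> simp

lemma char_eq (c : Char) (h : pvDomChar c = true) :
    pvStepA c = pvTable.getD c c := by
  have hall : ∀ n ∈ List.range 127,
      pvStepA (Char.ofNat n) = pvTable.getD (Char.ofNat n) (Char.ofNat n) := by
    set_option maxRecDepth 4000 in decide
  have hlt : c.toNat < 127 := by
    simp only [pvDomChar, Bool.or_eq_true, Bool.and_eq_true, decide_eq_true_eq,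
      beq_iff_eq] at h
    omega
  have := hall c.toNat (List.mem_range.mpr hlt)
  simpa [Char.ofNat_toNat] using this

-- ===== VERDICT (by name: the statement is the Claim_ definition above) =====
theorem solution_spec : Claim_equal_solution := by
  intro s hdom
  unfold Spec_solution solution solution_alt
  have h1 := foldA_eq s.toList ""
  have h2 : s.toList.map pvStepA = s.toList.map (fun ch => pvTable.getD ch ch) := by
    apply List.map_congr_left
    intro c hc
    exact char_eq c (by
      have := (List.all_eq_true.mp hdom) c hc
      simpa using this)
  have : ((s.toList.foldl (fun answer ch =>
      if ch = 'a' then answer.push 'A'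
      else if ch ≠ 'A' ∧ PySem.Chars.isupper ch then answer.push (PySem.Chars.lowerChar ch)
      else answer.push ch) "").toList)
      = (String.ofList (s.toList.map (fun ch => pvTable.getD ch ch))).toList := by
    rw [h1, h2]; simp
  exact String.toList_inj.mp this
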